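-- pv_equiv track=rewrite | github.com/nguyenhien7268-ship-it/git1 | logic/bridges/de_bridge_scanner.py | _compute_pascal_reduction
-- ===== SOURCE A (Python) =====
-- from typing import List, Dict, Any, Optional, Tuple, Set
--
-- def _compute_pascal_reduction(digits: List[int]) -> Optional[Tuple[int, int]]:
--     current_layer = digits
--     while len(current_layer) > 2:
--         next_layer = []
--         for i in range(len(current_layer) - 1):
--             sum_val = (current_layer[i] + current_layer[i+1]) % 10
--             next_layer.append(sum_val)
--         current_layer = next_layer
--     if len(current_layer) == 2:
--         return (current_layer[0], current_layer[1])
--     return None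
-- ===== SOURCE B (Python) =====
-- def _compute_pascal_reduction(digits):
--     n = len(digits)
--     if n < 2:
--         return None
--     if n == 2:
--         return (digits[0], digits[1])
--     m = n - 2
--     # binomial row C(m, 0..m), built incrementally
--     row = [1]
--     c = 1
--     for k in range(m):
--         c = c * (m - k) // (k + 1)
--         row.append(c)
--     s0 = sum(cf * d for cf, d in zip(row, digits))
--     s1 = sum(cf * d for cf, d in zip(row, digits[1:]))
--     return (s0 % 10, s1 % 10)
-- ===== Notes on version B (the rewrite author's own statement) =====
-- stated objective: faster
-- what changed: Replaces the iterated O(n^2) pairwise-sum-mod-10 reduction with a single binomial-weighted dot product: the final pair equals (sum C(n-2,k)*d[k], sum C(n-2,k)*d[k+1]) mod 10, with the binomial row built incrementally in one pass.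
import Mathlib
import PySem

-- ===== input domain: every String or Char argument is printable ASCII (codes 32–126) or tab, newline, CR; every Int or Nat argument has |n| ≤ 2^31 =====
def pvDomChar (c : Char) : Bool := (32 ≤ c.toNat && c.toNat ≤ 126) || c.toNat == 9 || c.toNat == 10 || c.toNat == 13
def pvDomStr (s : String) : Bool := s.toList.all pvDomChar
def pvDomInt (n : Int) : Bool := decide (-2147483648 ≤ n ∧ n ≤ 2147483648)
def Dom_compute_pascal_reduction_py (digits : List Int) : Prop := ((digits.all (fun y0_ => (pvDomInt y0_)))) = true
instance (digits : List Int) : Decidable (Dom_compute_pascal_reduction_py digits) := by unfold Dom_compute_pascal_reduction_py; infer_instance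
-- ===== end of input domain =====

-- B replaces A's iterated pairwise-(sum mod 10) reduction by a single binomial-weighted
-- dot product (one pass building the binomial row); objective: faster.

-- ===== PORT A =====
-- the inner 'for i in range(len(cur)-1): next.append((cur[i]+cur[i+1])%10)';
-- the index i is always in range there, so getD is exact
def pvStepA (l : List Int) : List Int :=
  (List.range (l.length - 1)).map (fun i => (l.getD i 0 + l.getD (i + 1) 0) % 10)

-- 'while len(current_layer) > 2: current_layer = next_layer'
def pvLoopA (l : List Int) : List Int :=
  if 2 < l.length then pvLoopA (pvStepA l) else l
termination_by l.length
decreasing_by simp [pvStepA]; omega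

def compute_pascal_reduction_py (digits : List Int) : Option (Int × Int) :=
  let c := pvLoopA digits
  if c.length = 2 then some (c.getD 0 0, c.getD 1 0) else none

-- ===== PORT B =====
-- 'row = [1]; c = 1; for k in range(m): c = c*(m-k)//(k+1); row.append(c)'
def pvRowB (m : Nat) : List Int × Int :=
  (List.range m).foldl
    (fun st (k : Nat) =>
      let c' := PySem.Int.floordiv (st.2 * ((m : Int) - (k : Int))) ((k : Int) + 1)
      (st.1 ++ [c'], c'))
    ([1], 1)

-- 'sum(cf * d for cf, d in zip(row, ds))'
def pvDotB (row ds : List Int) : Int :=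
  ((row.zip ds).map (fun p => p.1 * p.2)).sum

def compute_pascal_reduction_py_alt (digits : List Int) : Option (Int × Int) :=
  let n := digits.length
  if n < 2 then none
  else if n = 2 then some (digits.getD 0 0, digits.getD 1 0)
  else
    let m := n - 2
    let row := (pvRowB m).1
    let s0 := pvDotB row digits
    let s1 := pvDotB row (digits.drop 1)
    some (s0 % 10, s1 % 10)

-- ===== PRECONDITION & SPEC =====
def Spec_compute_pascal_reduction_py (digits : List Int) (out : Option (Int × Int)) : Prop := out = compute_pascal_reduction_py_alt digits
instance (digits : List Int) (out : Option (Int × Int)) : Decidable (Spec_compute_pascal_reduction_py digits out) := by unfold Spec_compute_pascal_reduction_py; infer_instance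

-- ===== CLAIM (what is proved, stated in full; the proofs are below) =====
def Claim_equal_compute_pascal_reduction_py : Prop := ∀ (digits : List Int), Dom_compute_pascal_reduction_py digits → Spec_compute_pascal_reduction_py digits (compute_pascal_reduction_py digits)

-- ===== LEMMAS AND PROOFS =====

-- the binomial-weighted sum Σ_{k≤m} C(m,k)·l[k]
def pvS (m : Nat) (l : List Int) : Int :=
  ∑ k ∈ Finset.range (m + 1), (Nat.choose m k : Int) * l.getD k 0

theorem pv_getD_tail (l : List Int) (k : Nat) : l.tail.getD k 0 = l.getD (k + 1) 0 := by
  cases l <;> simp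

theorem pv_stepA_length (l : List Int) : (pvStepA l).length = l.length - 1 := by
  simp [pvStepA]

theorem pv_stepA_getD (l : List Int) (k : Nat) (hk : k < l.length - 1) :
    (pvStepA l).getD k 0 = (l.getD k 0 + l.getD (k + 1) 0) % 10 := by
  rw [List.getD_eq_getElem?_getD]
  simp [pvStepA, hk]

theorem pv_stepA_tail (l : List Int) : (pvStepA l).tail = pvStepA l.tail := by
  apply List.ext_getElem
  · simp [pvStepA]
  · intro i h1 h2
    simp [pvStepA]

-- Pascal's rule at the level of the weighted sum
theorem pv_pascal (m : Nat) (l : List Int) : pvS (m + 1) l = pvS m l + pvS m l.tail := by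
  unfold pvS
  rw [Finset.sum_range_succ' (fun k => ((Nat.choose (m+1) k : Int)) * l.getD k 0) (m+1),
      Finset.sum_range_succ' (fun k => ((Nat.choose m k : Int)) * l.getD k 0) m]
  simp only [pv_getD_tail, Nat.choose_succ_succ, Nat.choose_zero_right]
  push_cast
  simp only [add_mul, Finset.sum_add_distrib]
  rw [Finset.sum_range_succ (fun x => ((Nat.choose m (x+1) : Int)) * l.getD (x+1) 0) m]
  simp only [Nat.choose_succ_self]
  push_cast
  ring

-- mod-10 invariance of the weighted sum across one reduction step
theorem pv_step_mod (m : Nat) (l : List Int) (hl : m + 2 ≤ l.length - 1) :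
    pvS (m + 1) (pvStepA l) % 10 = pvS (m + 2) l % 10 := by
  have h1 : pvS (m + 1) (pvStepA l)
      = ∑ k ∈ Finset.range (m + 2), (Nat.choose (m+1) k : Int) * ((l.getD k 0 + l.getD (k+1) 0) % 10) := by
    unfold pvS
    refine Finset.sum_congr rfl ?_
    intro k hk
    rw [pv_stepA_getD l k (by simp at hk; omega)]
  have h2 : pvS (m + 1) (pvStepA l) % 10
      = (∑ k ∈ Finset.range (m + 2), (Nat.choose (m+1) k : Int) * (l.getD k 0 + l.getD (k+1) 0)) % 10 := by
    rw [h1, Finset.sum_int_mod, Finset.sum_int_mod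
      (f := fun k => (Nat.choose (m+1) k : Int) * (l.getD k 0 + l.getD (k+1) 0))]
    congr 1
    refine Finset.sum_congr rfl ?_
    intro k _
    conv_lhs => rw [Int.mul_emod]
    conv_rhs => rw [Int.mul_emod]
    rw [Int.emod_emod_of_dvd _ (dvd_refl 10)]
  rw [h2]
  congr 1
  rw [show m + 2 = (m + 1) + 1 from rfl, pv_pascal]
  unfold pvS
  simp only [pv_getD_tail, mul_add, Finset.sum_add_distrib]

-- invariant of A's while loop: the final pair is the binomial-weighted sums mod 10
theorem pv_main (m : Nat) (l : List Int) (hl : l.length = m + 3) :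
    pvLoopA l = [pvS (m + 1) l % 10, pvS (m + 1) l.tail % 10] := by
  induction m generalizing l with
  | zero =>
    rw [pvLoopA, if_pos (by omega), pvLoopA, if_neg (by rw [pv_stepA_length]; omega)]
    obtain ⟨a, b, c, rfl⟩ : ∃ a b c, l = [a, b, c] := by
      match l, hl with | [a,b,c], _ => exact ⟨a,b,c,rfl⟩
    simp [pvStepA, pvS, List.range_succ, Finset.sum_range_succ]
  | succ m ih =>
    rw [pvLoopA, if_pos (by omega)]
    rw [ih (pvStepA l) (by rw [pv_stepA_length]; omega)]
    rw [pv_step_mod m l (by omega), pv_stepA_tail, pv_step_mod m l.tail (by simp; omega)]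

-- B's incremental row really is the binomial row (exactness of c*(m-k)//(k+1))
theorem pv_row_aux (m j : Nat) (hj : j ≤ m) :
    (List.range j).foldl
      (fun st (k : Nat) =>
        let c' := PySem.Int.floordiv (st.2 * ((m : Int) - (k : Int))) ((k : Int) + 1)
        (st.1 ++ [c'], c'))
      ([1], 1)
    = ((List.range (j+1)).map (fun k => (Nat.choose m k : Int)), (Nat.choose m j : Int)) := by
  induction j with
  | zero => simp
  | succ j ih =>
    rw [List.range_succ, List.foldl_append, ih (by omega)]
    have hstep : PySem.Int.floordiv ((Nat.choose m j : Int) * ((m : Int) - (j : Int))) ((j : Int) + 1)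
        = (Nat.choose m (j+1) : Int) := by
      have hmj : ((m : Int) - (j : Int)) = ((m - j : Nat) : Int) := by
        push_cast [Nat.cast_sub (by omega : j ≤ m)]; ring
      rw [hmj, ← Nat.cast_mul, show ((j:Int) + 1) = ((j+1 : Nat) : Int) by push_cast; ring,
          PySem.Int.floordiv_natCast]
      congr 1
      rw [← Nat.choose_succ_right_eq, Nat.mul_div_cancel _ (by omega)]
    simp only [List.foldl_cons, List.foldl_nil, hstep]
    rw [List.range_succ (n := j+1), List.map_append]
    simp

theorem pv_row_spec (m : Nat) :
    (pvRowB m).1 = (List.range (m + 1)).map (fun k => (Nat.choose m k : Int)) := by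
  rw [pvRowB, pv_row_aux m m le_rfl]

theorem pv_dot_spec (m : Nat) (l : List Int) (hl : m + 1 ≤ l.length) :
    pvDotB ((List.range (m + 1)).map (fun k => (Nat.choose m k : Int))) l = pvS m l := by
  unfold pvDotB pvS
  have hzip : (((List.range (m+1)).map (fun k => (Nat.choose m k : Int))).zip l)
      = (List.range (m+1)).map (fun k => ((Nat.choose m k : Int), l.getD k 0)) := by
    apply List.ext_getElem
    · simp; omega
    · intro i h1 h2
      simp at h1 h2 ⊢
      rw [List.getElem?_eq_getElem (by omega)]
      rfl
  rw [hzip, List.map_map]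
  rfl

-- ===== VERDICT (by name: the statement is the Claim_ definition above) =====
theorem compute_pascal_reduction_py_spec : Claim_equal_compute_pascal_reduction_py := by
  intro digits _
  unfold Spec_compute_pascal_reduction_py compute_pascal_reduction_py compute_pascal_reduction_py_alt
  by_cases h2 : digits.length < 2
  · rw [pvLoopA, if_neg (show ¬ 2 < digits.length by omega)]
    simp [if_neg (show ¬ digits.length = 2 by omega)]
    omega
  · by_cases h3 : digits.length = 2
    · rw [pvLoopA, if_neg (show ¬ 2 < digits.length by omega)]
      simp [h3]
    · obtain ⟨m, hm⟩ : ∃ m, digits.length = m + 3 := ⟨digits.length - 3, by omega⟩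
      rw [pv_main m digits hm]
      have hrow : digits.length - 2 = m + 1 := by omega
      rw [if_neg h2, if_neg h3]
      simp only [hrow, pv_row_spec]
      rw [pv_dot_spec (m+1) digits (by omega),
          pv_dot_spec (m+1) (digits.drop 1) (by simp; omega)]
      simp [← List.drop_one]
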